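-- pv_equiv track=rewrite | github.com/DaisioSK/CS5446-Warehouse-Robot | custom_layouts_old_full.py | inflate_obstacles
-- ===== SOURCE A (Python) =====
-- from typing import Dict, Iterable, List, Optional, Sequence, Set, Tuple
--
-- Coord = Tuple[int, int]
--
-- def inflate_obstacles(obstacles: Iterable[Coord], H: int, W: int, radius: int) -> List[Coord]:
--     if radius <= 0:
--         return sorted(set(obstacles))
--     inflated: Set[Coord] = set()
--     for x, y in obstacles:
--         for dx in range(-radius, radius + 1):
--             for dy in range(-radius, radius + 1):
--                 nx, ny = x + dx, y + dy
--                 if 0 <= nx < H and 0 <= ny < W: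
--                     inflated.add((nx, ny))
--     return sorted(inflated)
-- ===== SOURCE B (Python) =====
-- from typing import Dict, Iterable, List, Set, Tuple
--
-- Coord = Tuple[int, int]
--
-- def inflate_obstacles(obstacles: Iterable[Coord], H: int, W: int, radius: int) -> List[Coord]:
--     if radius <= 0:
--         return sorted(set(obstacles))
--     # Group by inflated row: rows[nx] = the set of obstacle y's whose x-dilation reaches row nx.
--     rows: Dict[int, Set[int]] = {}
--     for x, y in obstacles:
--         for nx in range(max(0, x - radius), min(H, x + radius + 1)):
--             rows.setdefault(nx, set()).add(y)
--     # Emit rows in increasing order; within a row dilate along y and emit sorted columns.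
--     # The output is built already sorted: no global sort needed.
--     result: List[Coord] = []
--     for nx in sorted(rows):
--         cols: Set[int] = set()
--         for y in rows[nx]:
--             for ny in range(max(0, y - radius), min(W, y + radius + 1)):
--                 cols.add(ny)
--         for ny in sorted(cols):
--             result.append((nx, ny))
--     return result
-- ===== Notes on version B (the rewrite author's own statement) =====
-- stated objective: alternative
-- what changed: Replaces A's per-obstacle 2D neighbourhood scan followed by one global sort with a row-index: obstacles are grouped into a dict mapping each inflated row to its obstacle columns, then rows are emitted in increasing order with per-row y-dilation and a per-row sort, so the sorted output is built directly and the global sort over all inflated cells disappears.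
import Mathlib
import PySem

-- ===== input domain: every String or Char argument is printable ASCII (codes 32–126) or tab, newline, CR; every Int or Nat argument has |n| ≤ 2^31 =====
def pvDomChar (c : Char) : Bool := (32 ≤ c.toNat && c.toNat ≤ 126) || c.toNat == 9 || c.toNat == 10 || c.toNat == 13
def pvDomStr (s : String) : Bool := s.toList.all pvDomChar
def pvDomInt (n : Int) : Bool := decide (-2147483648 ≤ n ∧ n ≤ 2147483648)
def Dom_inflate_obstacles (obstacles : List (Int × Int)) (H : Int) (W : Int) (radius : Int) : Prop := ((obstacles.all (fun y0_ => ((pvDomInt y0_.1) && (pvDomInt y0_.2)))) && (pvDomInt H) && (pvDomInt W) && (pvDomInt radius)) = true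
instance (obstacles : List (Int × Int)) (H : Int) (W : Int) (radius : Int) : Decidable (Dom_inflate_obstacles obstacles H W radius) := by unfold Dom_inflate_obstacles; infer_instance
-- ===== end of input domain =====

-- B replaces A's per-obstacle 2D neighbourhood scan + one global sort by a row index:
-- a dict grouping obstacle columns under each inflated row, then rows emitted in increasing
-- order with a per-row y-dilation and per-row sort, building the sorted output directly.

-- ===== PORT A =====
def inflate_obstacles (obstacles : List (Int × Int)) (H : Int) (W : Int) (radius : Int) : List (Int × Int) :=
  if radius ≤ 0 then
    PySem.List.sorted2 (PySem.Set.ofList obstacles) Prod.fst Prod.snd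
  else
    let inflated : PySem.Set (Int × Int) :=
      obstacles.foldl (fun s p =>
        (PySem.List.pyRange (-radius) (radius + 1)).foldl (fun s dx =>
          (PySem.List.pyRange (-radius) (radius + 1)).foldl (fun s dy =>
            let nx := p.1 + dx
            let ny := p.2 + dy
            if 0 ≤ nx ∧ nx < H ∧ 0 ≤ ny ∧ ny < W then PySem.Set.add s (nx, ny) else s) s) s)
        PySem.Set.empty
    PySem.List.sorted2 inflated Prod.fst Prod.snd

-- ===== PORT B =====
def inflate_obstacles_alt (obstacles : List (Int × Int)) (H : Int) (W : Int) (radius : Int) : List (Int × Int) :=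
  if radius ≤ 0 then
    PySem.List.sorted2 (PySem.Set.ofList obstacles) Prod.fst Prod.snd
  else
    -- rows.setdefault(nx, set()).add(y)  ==  rows[nx] = rows.get(nx, set()) with y added
    let rows : PySem.Dict Int (PySem.Set Int) :=
      obstacles.foldl (fun d p =>
        (PySem.List.pyRange (max 0 (p.1 - radius)) (min H (p.1 + radius + 1))).foldl
          (fun d nx => PySem.Dict.modify d nx PySem.Set.empty (fun s => PySem.Set.add s p.2)) d)
        PySem.Dict.empty
    -- Source B iterates the per-row Python set rows[nx] only to build another set, so the
    -- result does not depend on that iteration order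
    (PySem.List.sorted (PySem.Dict.keys rows) (fun k => k) false).foldl (fun res nx =>
      let cols : PySem.Set Int :=
        (PySem.Dict.getD rows nx PySem.Set.empty).foldl (fun s y =>
          (PySem.List.pyRange (max 0 (y - radius)) (min W (y + radius + 1))).foldl
            (fun s ny => PySem.Set.add s ny) s)
          PySem.Set.empty
      (PySem.List.sorted cols (fun k => k) false).foldl (fun res ny => res ++ [(nx, ny)]) res) []

-- ===== PRECONDITION & SPEC =====
def Spec_inflate_obstacles (obstacles : List (Int × Int)) (H : Int) (W : Int) (radius : Int) (out : List (Int × Int)) : Prop := out = inflate_obstacles_alt obstacles H W radius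
instance (obstacles : List (Int × Int)) (H : Int) (W : Int) (radius : Int) (out : List (Int × Int)) : Decidable (Spec_inflate_obstacles obstacles H W radius out) := by unfold Spec_inflate_obstacles; infer_instance

-- ===== CLAIM (what is proved, stated in full; the proofs are below) =====
def Claim_equal_inflate_obstacles : Prop := ∀ (obstacles : List (Int × Int)) (H : Int) (W : Int) (radius : Int), Dom_inflate_obstacles obstacles H W radius → Spec_inflate_obstacles obstacles H W radius (inflate_obstacles obstacles H W radius)

-- ===== LEMMAS AND PROOFS =====

-- foldl preserves Nodup when every step does
theorem pv_nodup_foldl {α β : Type} (g : List α → β → List α)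
    (hg : ∀ s b, s.Nodup → (g s b).Nodup) :
    ∀ (l : List β) (s : List α), s.Nodup → (l.foldl g s).Nodup := by
  intro l
  induction l with
  | nil => intro s hs; simpa using hs
  | cons b t ih => intro s hs; exact ih _ (hg s b hs)

-- membership through a foldl whose step's membership is characterised
theorem pv_mem_foldl {α β : Type} (g : List α → β → List α) (P : β → α → Prop)
    (hg : ∀ s b y, y ∈ g s b ↔ y ∈ s ∨ P b y) :
    ∀ (l : List β) (s : List α) (y : α), y ∈ l.foldl g s ↔ y ∈ s ∨ ∃ b ∈ l, P b y := by
  intro l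
  induction l with
  | nil => intro s y; simp
  | cons b t ih =>
    intro s y
    simp only [List.foldl_cons, ih, hg, List.mem_cons]
    constructor
    · rintro ((h | h) | ⟨c, hc, h⟩)
      · exact Or.inl h
      · exact Or.inr ⟨b, Or.inl rfl, h⟩
      · exact Or.inr ⟨c, Or.inr hc, h⟩
    · rintro (h | ⟨c, (rfl | hc), h⟩)
      · exact Or.inl (Or.inl h)
      · exact Or.inl (Or.inr h)
      · exact Or.inr ⟨c, hc, h⟩

-- lookup after the inner row loop: the key's set gains v iff the key is in the range list
theorem pv_getD_inner (xs : List Int) (v : Int) (d : PySem.Dict Int (PySem.Set Int)) (k : Int) :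
    PySem.Dict.getD (xs.foldl (fun d nx => PySem.Dict.modify d nx PySem.Set.empty (fun s => PySem.Set.add s v)) d) k PySem.Set.empty
      = if k ∈ xs then PySem.Set.add (PySem.Dict.getD d k PySem.Set.empty) v
        else PySem.Dict.getD d k PySem.Set.empty := by
  induction xs generalizing d with
  | nil => simp
  | cons j t ih =>
    simp only [List.foldl_cons, ih, PySem.Dict.getD_modify, List.mem_cons]
    by_cases hk : k = j
    · subst hk
      by_cases ht : k ∈ t <;> simp [ht]
    · by_cases ht : k ∈ t <;> simp [ht, hk]


-- lookup into the finished rows dict: the columns stored under row k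
theorem pv_mem_getD_rows (H radius : Int) :
    ∀ (obstacles : List (Int × Int)) (d : PySem.Dict Int (PySem.Set Int)) (k y : Int),
    (y ∈ PySem.Dict.getD (obstacles.foldl (fun d p =>
        (PySem.List.pyRange (max 0 (p.1 - radius)) (min H (p.1 + radius + 1))).foldl
          (fun d nx => PySem.Dict.modify d nx PySem.Set.empty (fun s => PySem.Set.add s p.2)) d)
        d) k PySem.Set.empty)
    ↔ y ∈ PySem.Dict.getD d k PySem.Set.empty ∨
        ∃ p ∈ obstacles, y = p.2 ∧ k ∈ PySem.List.pyRange (max 0 (p.1 - radius)) (min H (p.1 + radius + 1)) := by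
  intro obstacles
  induction obstacles with
  | nil => simp
  | cons p t ih =>
    intro d k y
    simp only [List.foldl_cons, ih, List.mem_cons]
    rw [pv_getD_inner]
    by_cases h : k ∈ PySem.List.pyRange (max 0 (p.1 - radius)) (min H (p.1 + radius + 1))
    · simp only [h, if_pos, PySem.Set.mem_add]
      constructor
      · rintro ((hy | rfl) | ⟨q, hq, hyq, hkq⟩)
        · exact Or.inl hy
        · exact Or.inr ⟨p, Or.inl rfl, rfl, h⟩
        · exact Or.inr ⟨q, Or.inr hq, hyq, hkq⟩
      · rintro (hy | ⟨q, (rfl | hq), hyq, hkq⟩)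
        · exact Or.inl (Or.inl hy)
        · exact Or.inl (Or.inr hyq)
        · exact Or.inr ⟨q, hq, hyq, hkq⟩
    · simp only [h, if_false]
      constructor
      · rintro (hy | ⟨q, hq, hyq, hkq⟩)
        · exact Or.inl hy
        · exact Or.inr ⟨q, Or.inr hq, hyq, hkq⟩
      · rintro (hy | ⟨q, (rfl | hq), hyq, hkq⟩)
        · exact Or.inl hy
        · exact absurd hkq h
        · exact Or.inr ⟨q, hq, hyq, hkq⟩

-- the keys of the finished rows dict: every row some obstacle's x-dilation reaches
theorem pv_mem_keys_rows (H radius : Int) :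
    ∀ (obstacles : List (Int × Int)) (d : PySem.Dict Int (PySem.Set Int)) (k : Int),
    (k ∈ PySem.Dict.keys (obstacles.foldl (fun d p =>
        (PySem.List.pyRange (max 0 (p.1 - radius)) (min H (p.1 + radius + 1))).foldl
          (fun d nx => PySem.Dict.modify d nx PySem.Set.empty (fun s => PySem.Set.add s p.2)) d)
        d))
    ↔ k ∈ PySem.Dict.keys d ∨
        ∃ p ∈ obstacles, k ∈ PySem.List.pyRange (max 0 (p.1 - radius)) (min H (p.1 + radius + 1)) := by
  intro obstacles
  induction obstacles with
  | nil => simp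
  | cons p t ih =>
    intro d k
    simp only [List.foldl_cons, ih, List.mem_cons]
    rw [PySem.Dict.keys_foldl_modify _ _ (fun _ _ => (fun s => PySem.Set.add s p.2))]
    rw [PySem.Set.mem_update]
    constructor
    · rintro ((hk | hk) | ⟨q, hq, hkq⟩)
      · exact Or.inl hk
      · exact Or.inr ⟨p, Or.inl rfl, hk⟩
      · exact Or.inr ⟨q, Or.inr hq, hkq⟩
    · rintro (hk | ⟨q, (rfl | hq), hkq⟩)
      · exact Or.inl (Or.inl hk)
      · exact Or.inl (Or.inr hkq)
      · exact Or.inr ⟨q, hq, hkq⟩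

-- the key list of the finished rows dict is duplicate-free
theorem pv_nodup_keys_rows (H radius : Int) :
    ∀ (obstacles : List (Int × Int)) (d : PySem.Dict Int (PySem.Set Int)),
    (PySem.Dict.keys d).Nodup →
    (PySem.Dict.keys (obstacles.foldl (fun d p =>
        (PySem.List.pyRange (max 0 (p.1 - radius)) (min H (p.1 + radius + 1))).foldl
          (fun d nx => PySem.Dict.modify d nx PySem.Set.empty (fun s => PySem.Set.add s p.2)) d)
        d)).Nodup := by
  intro obstacles
  induction obstacles with
  | nil => intro d h; simpa using h
  | cons p t ih =>
    intro d h
    simp only [List.foldl_cons]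
    apply ih
    rw [PySem.Dict.keys_foldl_modify _ _ (fun _ _ => (fun s => PySem.Set.add s p.2))]
    exact PySem.Set.nodup_update _ _ h

-- membership in the per-row dilated column set
theorem pv_mem_cols (M : List Int) (W radius : Int) (v : Int) :
    (v ∈ M.foldl (fun s y =>
        (PySem.List.pyRange (max 0 (y - radius)) (min W (y + radius + 1))).foldl
          (fun s ny => PySem.Set.add s ny) s) PySem.Set.empty)
    ↔ ∃ y ∈ M, v ∈ PySem.List.pyRange (max 0 (y - radius)) (min W (y + radius + 1)) := by
  rw [pv_mem_foldl _
    (fun y v => v ∈ PySem.List.pyRange (max 0 (y - radius)) (min W (y + radius + 1)))]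
  · simp [PySem.Set.empty]
  · intro s y v
    rw [pv_mem_foldl _ (fun ny v => v = ny) (fun s ny v => PySem.Set.mem_add s _ v)]
    constructor
    · rintro (h | ⟨ny, hny, rfl⟩)
      · exact Or.inl h
      · exact Or.inr hny
    · rintro (h | h)
      · exact Or.inl h
      · exact Or.inr ⟨v, h, rfl⟩

-- the per-row dilated column set is duplicate-free
theorem pv_nodup_cols (M : List Int) (W radius : Int) :
    (M.foldl (fun s y =>
        (PySem.List.pyRange (max 0 (y - radius)) (min W (y + radius + 1))).foldl
          (fun s ny => PySem.Set.add s ny) s) PySem.Set.empty).Nodup := by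
  refine pv_nodup_foldl _ ?_ _ _ (by simp [PySem.Set.empty])
  intro s y hs
  exact pv_nodup_foldl _ (fun s ny hs => PySem.Set.nodup_add s ny hs) _ _ hs

-- membership in A's inflated set
theorem pv_mem_A (obstacles : List (Int × Int)) (H W radius : Int) (y : Int × Int) :
    (y ∈ obstacles.foldl (fun s p =>
        (PySem.List.pyRange (-radius) (radius + 1)).foldl (fun s dx =>
          (PySem.List.pyRange (-radius) (radius + 1)).foldl (fun s dy =>
            let nx := p.1 + dx
            let ny := p.2 + dy
            if 0 ≤ nx ∧ nx < H ∧ 0 ≤ ny ∧ ny < W then PySem.Set.add s (nx, ny) else s) s) s)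
        PySem.Set.empty)
    ↔ ∃ p ∈ obstacles, ∃ dx ∈ PySem.List.pyRange (-radius) (radius + 1),
        ∃ dy ∈ PySem.List.pyRange (-radius) (radius + 1),
        (0 ≤ p.1 + dx ∧ p.1 + dx < H ∧ 0 ≤ p.2 + dy ∧ p.2 + dy < W) ∧ y = (p.1 + dx, p.2 + dy) := by
  rw [pv_mem_foldl _
    (fun p y => ∃ dx ∈ PySem.List.pyRange (-radius) (radius + 1),
        ∃ dy ∈ PySem.List.pyRange (-radius) (radius + 1),
        (0 ≤ p.1 + dx ∧ p.1 + dx < H ∧ 0 ≤ p.2 + dy ∧ p.2 + dy < W) ∧ y = (p.1 + dx, p.2 + dy))]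
  · simp [PySem.Set.empty]
  · intro s p y
    rw [pv_mem_foldl _
      (fun dx y => ∃ dy ∈ PySem.List.pyRange (-radius) (radius + 1),
        (0 ≤ p.1 + dx ∧ p.1 + dx < H ∧ 0 ≤ p.2 + dy ∧ p.2 + dy < W) ∧ y = (p.1 + dx, p.2 + dy))]
    · intro s dx y
      refine pv_mem_foldl _
        (fun dy y => (0 ≤ p.1 + dx ∧ p.1 + dx < H ∧ 0 ≤ p.2 + dy ∧ p.2 + dy < W) ∧ y = (p.1 + dx, p.2 + dy))
        ?_ _ s y
      intro s dy y
      simp only []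
      split_ifs with hc
      · rw [PySem.Set.mem_add]
        tauto
      · tauto

-- A's inflated set is duplicate-free
theorem pv_nodup_A (obstacles : List (Int × Int)) (H W radius : Int) :
    (obstacles.foldl (fun s p =>
        (PySem.List.pyRange (-radius) (radius + 1)).foldl (fun s dx =>
          (PySem.List.pyRange (-radius) (radius + 1)).foldl (fun s dy =>
            let nx := p.1 + dx
            let ny := p.2 + dy
            if 0 ≤ nx ∧ nx < H ∧ 0 ≤ ny ∧ ny < W then PySem.Set.add s (nx, ny) else s) s) s)
        PySem.Set.empty).Nodup := by
  refine pv_nodup_foldl _ ?_ _ _ (by simp [PySem.Set.empty])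
  intro s p hs
  refine pv_nodup_foldl _ ?_ _ _ hs
  intro s dx hs
  refine pv_nodup_foldl _ ?_ _ _ hs
  intro s dy hs
  simp only []
  split_ifs with hc
  · exact PySem.Set.nodup_add _ _ hs
  · exact hs

-- membership in A's set, phrased through the clamped one-axis ranges B uses
theorem pv_mem_A_ranges (obstacles : List (Int × Int)) (H W radius : Int) (y : Int × Int) :
    (y ∈ obstacles.foldl (fun s p =>
        (PySem.List.pyRange (-radius) (radius + 1)).foldl (fun s dx =>
          (PySem.List.pyRange (-radius) (radius + 1)).foldl (fun s dy =>
            let nx := p.1 + dx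
            let ny := p.2 + dy
            if 0 ≤ nx ∧ nx < H ∧ 0 ≤ ny ∧ ny < W then PySem.Set.add s (nx, ny) else s) s) s)
        PySem.Set.empty)
    ↔ ∃ p ∈ obstacles, y.1 ∈ PySem.List.pyRange (max 0 (p.1 - radius)) (min H (p.1 + radius + 1)) ∧
        y.2 ∈ PySem.List.pyRange (max 0 (p.2 - radius)) (min W (p.2 + radius + 1)) := by
  rw [pv_mem_A]
  constructor
  · rintro ⟨p, hp, dx, hdx, dy, hdy, hcond, rfl⟩
    rw [PySem.List.mem_pyRange_one] at hdx hdy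
    refine ⟨p, hp, ?_, ?_⟩ <;> (rw [PySem.List.mem_pyRange_one]; omega)
  · rintro ⟨p, hp, h1, h2⟩
    rw [PySem.List.mem_pyRange_one] at h1 h2
    refine ⟨p, hp, y.1 - p.1, ?_, y.2 - p.2, ?_, ?_, ?_⟩
    · rw [PySem.List.mem_pyRange_one]; omega
    · rw [PySem.List.mem_pyRange_one]; omega
    · refine ⟨by omega, by omega, by omega, by omega⟩
    · rw [Prod.ext_iff]
      constructor <;> (simp only []; omega)

-- sorting a duplicate-free Int list gives a strictly increasing list
theorem pv_sorted_pairwise_lt (l : List Int) (h : l.Nodup) :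
    (PySem.List.sorted l (fun k => k) false).Pairwise (· < ·) := by
  have h1 := PySem.List.sorted_pairwise (xs := l) (key := fun k => k)
  have h2 : (PySem.List.sorted l (fun k => k) false).Nodup :=
    ((PySem.List.sorted_perm l (fun k => k) false).symm).nodup h
  exact (h1.and h2).imp (fun hab => lt_of_le_of_ne hab.1 hab.2)

-- sorted2 with the two pair projections is sorted with the lexicographic key
theorem pv_sorted2_pair (xs : List (Int × Int)) :
    PySem.List.sorted2 xs Prod.fst Prod.snd false
      = PySem.List.sorted xs (fun p => toLex p) false := by
  have hfun : (fun (a b : Int × Int) =>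
      decide (a.1 < b.1) || (!decide (b.1 < a.1) && decide (a.2 < b.2)))
      = (fun (a b : Int × Int) => decide (toLex a < toLex b)) := by
    funext a b
    rw [Bool.eq_iff_iff]
    simp only [Bool.or_eq_true, Bool.and_eq_true, Bool.not_eq_eq_eq_not, Bool.not_true,
      decide_eq_true_eq, decide_eq_false_iff_not, Prod.Lex.toLex_lt_toLex]
    omega
  rw [PySem.List.sorted_eq_foldl_insertBy]
  unfold PySem.List.sorted2
  simp only [Bool.false_eq_true, if_false]
  rw [hfun]

-- the inflated-radius case: A's sorted set equals B's row-by-row emission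
theorem pv_main (obstacles : List (Int × Int)) (H W radius : Int) :
    PySem.List.sorted2
      (obstacles.foldl (fun s p =>
        (PySem.List.pyRange (-radius) (radius + 1)).foldl (fun s dx =>
          (PySem.List.pyRange (-radius) (radius + 1)).foldl (fun s dy =>
            let nx := p.1 + dx
            let ny := p.2 + dy
            if 0 ≤ nx ∧ nx < H ∧ 0 ≤ ny ∧ ny < W then PySem.Set.add s (nx, ny) else s) s) s)
        PySem.Set.empty) Prod.fst Prod.snd false
    = (PySem.List.sorted (PySem.Dict.keys (obstacles.foldl (fun d p =>
        (PySem.List.pyRange (max 0 (p.1 - radius)) (min H (p.1 + radius + 1))).foldl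
          (fun d nx => PySem.Dict.modify d nx PySem.Set.empty (fun s => PySem.Set.add s p.2)) d)
        PySem.Dict.empty)) (fun k => k) false).foldl (fun res nx =>
        (PySem.List.sorted
          ((PySem.Dict.getD (obstacles.foldl (fun d p =>
            (PySem.List.pyRange (max 0 (p.1 - radius)) (min H (p.1 + radius + 1))).foldl
              (fun d nx => PySem.Dict.modify d nx PySem.Set.empty (fun s => PySem.Set.add s p.2)) d)
            PySem.Dict.empty) nx PySem.Set.empty).foldl (fun s y =>
              (PySem.List.pyRange (max 0 (y - radius)) (min W (y + radius + 1))).foldl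
                (fun s ny => PySem.Set.add s ny) s)
              PySem.Set.empty) (fun k => k) false).foldl (fun res ny => res ++ [(nx, ny)]) res) [] := by
  have hstep : (fun (res : List (Int × Int)) (nx : Int) =>
        (PySem.List.sorted
          ((PySem.Dict.getD (obstacles.foldl (fun d p =>
            (PySem.List.pyRange (max 0 (p.1 - radius)) (min H (p.1 + radius + 1))).foldl
              (fun d nx => PySem.Dict.modify d nx PySem.Set.empty (fun s => PySem.Set.add s p.2)) d)
            PySem.Dict.empty) nx PySem.Set.empty).foldl (fun s y =>
              (PySem.List.pyRange (max 0 (y - radius)) (min W (y + radius + 1))).foldl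
                (fun s ny => PySem.Set.add s ny) s)
              PySem.Set.empty) (fun k => k) false).foldl (fun res ny => res ++ [(nx, ny)]) res)
      = fun res nx => res ++
        (PySem.List.sorted
          ((PySem.Dict.getD (obstacles.foldl (fun d p =>
            (PySem.List.pyRange (max 0 (p.1 - radius)) (min H (p.1 + radius + 1))).foldl
              (fun d nx => PySem.Dict.modify d nx PySem.Set.empty (fun s => PySem.Set.add s p.2)) d)
            PySem.Dict.empty) nx PySem.Set.empty).foldl (fun s y =>
              (PySem.List.pyRange (max 0 (y - radius)) (min W (y + radius + 1))).foldl
                (fun s ny => PySem.Set.add s ny) s)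
              PySem.Set.empty) (fun k => k) false).map (fun ny => (nx, ny)) := by
    funext res nx
    rw [PySem.List.foldl_append_singleton_eq_map]
  rw [hstep, PySem.List.foldl_append_eq_flatMap, List.nil_append]
  rw [pv_sorted2_pair]
  have hkeysnd : (PySem.Dict.keys (obstacles.foldl (fun d p =>
        (PySem.List.pyRange (max 0 (p.1 - radius)) (min H (p.1 + radius + 1))).foldl
          (fun d nx => PySem.Dict.modify d nx PySem.Set.empty (fun s => PySem.Set.add s p.2)) d)
        PySem.Dict.empty)).Nodup := by
    apply pv_nodup_keys_rows
    simp
  have hpw : (((PySem.List.sorted (PySem.Dict.keys (obstacles.foldl (fun d p =>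
        (PySem.List.pyRange (max 0 (p.1 - radius)) (min H (p.1 + radius + 1))).foldl
          (fun d nx => PySem.Dict.modify d nx PySem.Set.empty (fun s => PySem.Set.add s p.2)) d)
        PySem.Dict.empty)) (fun k => k) false).flatMap (fun nx =>
        (PySem.List.sorted
          ((PySem.Dict.getD (obstacles.foldl (fun d p =>
            (PySem.List.pyRange (max 0 (p.1 - radius)) (min H (p.1 + radius + 1))).foldl
              (fun d nx => PySem.Dict.modify d nx PySem.Set.empty (fun s => PySem.Set.add s p.2)) d)
            PySem.Dict.empty) nx PySem.Set.empty).foldl (fun s y =>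
              (PySem.List.pyRange (max 0 (y - radius)) (min W (y + radius + 1))).foldl
                (fun s ny => PySem.Set.add s ny) s)
              PySem.Set.empty) (fun k => k) false).map (fun ny => (nx, ny))))).Pairwise
        (fun a b => toLex a < toLex b) := by
    rw [List.pairwise_flatMap]
    constructor
    · intro nx _
      rw [List.pairwise_map]
      refine (pv_sorted_pairwise_lt _ ?_).imp ?_
      · exact pv_nodup_cols _ W radius
      · intro a b hab
        exact Prod.Lex.toLex_lt_toLex.mpr (Or.inr ⟨rfl, hab⟩)
    · refine (pv_sorted_pairwise_lt _ hkeysnd).imp ?_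
      intro nx nx' hlt x hx y hy
      rw [List.mem_map] at hx hy
      obtain ⟨a, _, rfl⟩ := hx
      obtain ⟨b, _, rfl⟩ := hy
      exact Prod.Lex.toLex_lt_toLex.mpr (Or.inl hlt)
  apply PySem.List.sorted_eq_of_perm_of_pairwise_lt
  · rw [List.perm_ext_iff_of_nodup
      (hpw.imp (fun {a b} hab heq => absurd (heq ▸ hab) (lt_irrefl _)))
      (pv_nodup_A obstacles H W radius)]
    intro a
    constructor
    · intro ha
      rw [List.mem_flatMap] at ha
      obtain ⟨nx, _, ha⟩ := ha
      rw [List.mem_map] at ha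
      obtain ⟨ny, hny, rfl⟩ := ha
      rw [PySem.List.mem_sorted, pv_mem_cols] at hny
      obtain ⟨ycol, hycol, hrange⟩ := hny
      rw [pv_mem_getD_rows] at hycol
      rcases hycol with h0 | ⟨q, hq, rfl, hkq⟩
      · simp [PySem.Set.empty] at h0
      · rw [pv_mem_A_ranges]
        exact ⟨q, hq, hkq, hrange⟩
    · intro ha
      rw [pv_mem_A_ranges] at ha
      obtain ⟨p, hp, h1, h2⟩ := ha
      rw [List.mem_flatMap]
      refine ⟨a.1, ?_, ?_⟩
      · rw [PySem.List.mem_sorted, pv_mem_keys_rows]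
        exact Or.inr ⟨p, hp, h1⟩
      · rw [List.mem_map]
        refine ⟨a.2, ?_, by simp⟩
        rw [PySem.List.mem_sorted, pv_mem_cols]
        refine ⟨p.2, ?_, h2⟩
        rw [pv_mem_getD_rows]
        exact Or.inr ⟨p, hp, rfl, h1⟩
  · exact hpw

-- ===== VERDICT (by name: the statement is the Claim_ definition above) =====
theorem inflate_obstacles_spec : Claim_equal_inflate_obstacles := by
  intro obstacles H W radius _
  unfold Spec_inflate_obstacles inflate_obstacles inflate_obstacles_alt
  by_cases hr : radius ≤ 0
  · rw [if_pos hr, if_pos hr]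
  · rw [if_neg hr, if_neg hr]
    exact pv_main obstacles H W radius
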